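-- pv_equiv track=rewrite | github.com/HaneulJung/Programmers | Programmers/Lv. 2/덧칠하기.py | solution
-- ===== SOURCE A (Python) =====
-- from collections import deque
--
-- def solution(n, m, section):
--     answer = 0
--
--     q = deque(section)
--
--     while q:
--         i = q.popleft()
--         while len(q) != 0 and q[0] <= i + m - 1:
--             q.popleft()
--         answer += 1
--     return answer
-- ===== SOURCE B (Python) =====
-- def solution(n, m, section):
--     answer = 0
--     painted = None  # right edge of the last painted roller stroke
--     for s in section:
--         if painted is None or s > painted:
--             answer += 1
--             painted = s + m - 1
--     return answer
-- ===== Notes on version B (the rewrite author's own statement) =====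
-- stated objective: simpler
-- what changed: Replaces the deque with nested pop-while loops by a single flat for-loop over section that maintains a scalar 'painted' boundary and skips already-covered sections.
import Mathlib
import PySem

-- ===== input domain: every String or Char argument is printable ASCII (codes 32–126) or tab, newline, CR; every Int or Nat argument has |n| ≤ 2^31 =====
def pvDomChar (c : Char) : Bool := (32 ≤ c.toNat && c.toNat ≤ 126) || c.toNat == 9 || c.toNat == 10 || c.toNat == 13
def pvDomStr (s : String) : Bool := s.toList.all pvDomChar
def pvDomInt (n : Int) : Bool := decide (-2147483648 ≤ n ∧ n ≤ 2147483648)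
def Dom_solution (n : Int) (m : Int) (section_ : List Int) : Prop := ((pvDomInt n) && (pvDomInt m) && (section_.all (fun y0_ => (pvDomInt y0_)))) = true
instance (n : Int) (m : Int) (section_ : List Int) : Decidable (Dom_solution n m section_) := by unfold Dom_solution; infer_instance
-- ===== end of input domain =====

-- B replaces A's deque with nested pop-while loops by a single flat fold keeping a scalar painted boundary (objective: simpler).


-- ===== PORT A =====
-- inner while: pop from the front while the head is ≤ bound
def solutionDrop (bound : Int) : List Int → List Int
  | [] => []
  | x :: xs => if x ≤ bound then solutionDrop bound xs else x :: xs

theorem solutionDrop_len (bound : Int) (l : List Int) :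
    (solutionDrop bound l).length ≤ l.length := by
  induction l with
  | nil => simp [solutionDrop]
  | cons x xs ih => simp only [solutionDrop]; split <;> simp <;> omega

-- outer while over the deque, with the answer accumulator
def solutionOuter (m : Int) : List Int → Int → Int
  | [], answer => answer
  | i :: q, answer => solutionOuter m (solutionDrop (i + m - 1) q) (answer + 1)
termination_by l => l.length
decreasing_by
  exact Nat.lt_succ_of_le (solutionDrop_len _ _)

def solution (n : Int) (m : Int) (section_ : List Int) : Int :=
  solutionOuter m section_ 0

-- ===== PORT B =====
def solution_alt (n : Int) (m : Int) (section_ : List Int) : Int :=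
  (section_.foldl
    (fun (st : Int × Option Int) s =>
      match st.2 with
      | none => (st.1 + 1, some (s + m - 1))
      | some b => if s > b then (st.1 + 1, some (s + m - 1)) else st)
    (0, none)).1

-- ===== PRECONDITION & SPEC =====
def Spec_solution (n : Int) (m : Int) (section_ : List Int) (out : Int) : Prop := out = solution_alt n m section_
instance (n : Int) (m : Int) (section_ : List Int) (out : Int) : Decidable (Spec_solution n m section_ out) := by unfold Spec_solution; infer_instance

-- ===== CLAIM (what is proved, stated in full; the proofs are below) =====
def Claim_equal_solution : Prop := ∀ (n : Int) (m : Int) (section_ : List Int), Dom_solution n m section_ → Spec_solution n m section_ (solution n m section_)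

-- ===== LEMMAS AND PROOFS =====
-- B's fold, started in state (a, some b), computes A's outer loop on the dropped queue.
theorem fold_eq_outer (m : Int) (l : List Int) :
    ∀ (a b : Int),
      (l.foldl
        (fun (st : Int × Option Int) s =>
          match st.2 with
          | none => (st.1 + 1, some (s + m - 1))
          | some b => if s > b then (st.1 + 1, some (s + m - 1)) else st)
        (a, some b)).1 = solutionOuter m (solutionDrop b l) a := by
  induction l with
  | nil => intro a b; simp [solutionDrop, solutionOuter]
  | cons x xs ih =>
    intro a b
    by_cases h : x ≤ b
    · have hx : ¬ x > b := by omega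
      simp [solutionDrop, h, hx, List.foldl_cons, ih]
    · have hx : x > b := by omega
      simp only [solutionDrop, if_neg h, List.foldl_cons, if_pos hx]
      rw [ih, solutionOuter]

-- ===== VERDICT (by name: the statement is the Claim_ definition above) =====
theorem solution_spec : Claim_equal_solution := by
  intro n m section_ _
  unfold Spec_solution solution solution_alt
  cases section_ with
  | nil => simp [solutionOuter]
  | cons x xs =>
    simp only [List.foldl_cons]
    rw [fold_eq_outer, solutionOuter]
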